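-- pv_equiv track=rewrite | github.com/Mctalian/RPGLootFeed | .scripts/organize_translations.py | sort_regions_by_keys
-- ===== SOURCE A (Python) =====
-- def sort_regions_by_keys(regions):
--     """
--     Sort translations within each region:
--     1. Untranslated (commented) entries first, sorted alphabetically by key
--     2. Translated entries next, sorted alphabetically by key
--     """
--     for region_name, translations in regions.items():
--         # Split into translated and untranslated entries
--         untranslated = []
--         translated = []
--
--         for entry in translations:
--             key, value, line = entry
--             if line.strip().startswith("--"):
--                 untranslated.append(entry)
--             else:
--                 translated.append(entry)
--
--         # Sort each group alphabetically
--         untranslated.sort(key=lambda x: x[0].lower())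
--         translated.sort(key=lambda x: x[0].lower())
--
--         # Combine: untranslated first, then translated
--         regions[region_name] = untranslated + translated
--
--     return regions
-- ===== SOURCE B (Python) =====
-- def sort_regions_by_keys(regions):
--     """
--     Sort translations within each region:
--     untranslated (commented) entries first, then translated entries,
--     each group alphabetically by lowercased key — via ONE stable sort
--     with a composite (group, key) sort key.
--     """
--     for region_name, translations in regions.items():
--         regions[region_name] = sorted(
--             translations,
--             key=lambda e: (not e[2].strip().startswith("--"), e[0].lower()),
--         )
--     return regions
-- ===== Notes on version B (the rewrite author's own statement) =====
-- stated objective: simpler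
-- what changed: Replaces the partition-into-two-lists-then-sort-each-and-concatenate loop by a single stable sort per region with a composite (not-commented, lowercased-key) sort key.
import Mathlib
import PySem

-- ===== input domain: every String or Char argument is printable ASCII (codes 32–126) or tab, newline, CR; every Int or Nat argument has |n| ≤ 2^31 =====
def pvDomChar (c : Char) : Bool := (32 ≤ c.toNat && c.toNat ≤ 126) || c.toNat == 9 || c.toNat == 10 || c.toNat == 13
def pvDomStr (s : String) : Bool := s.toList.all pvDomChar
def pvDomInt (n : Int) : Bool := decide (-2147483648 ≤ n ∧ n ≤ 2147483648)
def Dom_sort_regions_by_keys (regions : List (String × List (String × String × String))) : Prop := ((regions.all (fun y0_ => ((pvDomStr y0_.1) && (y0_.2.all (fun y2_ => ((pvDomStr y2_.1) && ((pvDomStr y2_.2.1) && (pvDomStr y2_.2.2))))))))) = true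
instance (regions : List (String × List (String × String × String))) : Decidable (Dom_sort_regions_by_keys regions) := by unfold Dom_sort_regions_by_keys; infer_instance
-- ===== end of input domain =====

-- B replaces A's partition-into-two-lists-then-sort-each-and-concatenate by a single stable
-- sort per region with a composite (not-commented, lowercased-key) key (objective: simpler).
-- Both A and B mutate the dict's values in place and return the same dict; the equivalence
-- proved here is about the returned value.

-- ===== PORT A =====
def sort_regions_by_keys (regions : List (String × List (String × String × String))) : List (String × List (String × String × String)) :=
  regions.map (fun r =>
    -- split into untranslated / translated by the loop over entries
    let split := r.2.foldl (fun acc entry =>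
      if PySem.Str.startswith (PySem.Str.strip entry.2.2) "--" then (acc.1 ++ [entry], acc.2)
      else (acc.1, acc.2 ++ [entry])) ([], [])
    -- sort each group alphabetically by lowercased key, then combine
    (r.1, PySem.List.sorted split.1 (fun x => PySem.Str.lower x.1) ++
          PySem.List.sorted split.2 (fun x => PySem.Str.lower x.1)))

-- ===== PORT B =====
def sort_regions_by_keys_alt (regions : List (String × List (String × String × String))) : List (String × List (String × String × String)) :=
  regions.map (fun r =>
    (r.1, PySem.List.sorted2 r.2
            (fun e => !(PySem.Str.startswith (PySem.Str.strip e.2.2) "--"))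
            (fun e => PySem.Str.lower e.1)))

-- ===== PRECONDITION & SPEC =====
def Spec_sort_regions_by_keys (regions : List (String × List (String × String × String))) (out : List (String × List (String × String × String))) : Prop := out = sort_regions_by_keys_alt regions
instance (regions : List (String × List (String × String × String))) (out : List (String × List (String × String × String))) : Decidable (Spec_sort_regions_by_keys regions out) := by unfold Spec_sort_regions_by_keys; infer_instance

-- ===== CLAIM (what is proved, stated in full; the proofs are below) =====
def Claim_equal_sort_regions_by_keys : Prop := ∀ (regions : List (String × List (String × String × String))), Dom_sort_regions_by_keys regions → Spec_sort_regions_by_keys regions (sort_regions_by_keys regions)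

-- ===== LEMMAS AND PROOFS =====

-- Inserting a group-true element (p x = true) into u ++ t, where u is all-true and t is
-- all-false, under the composite comparison, lands inside u under the plain k2 comparison.
theorem insertBy2_append_left {α κ : Type} [LinearOrder κ] (p : α → Bool) (k2 : α → κ)
    (x : α) (u t : List α) (hx : p x = true)
    (hu : ∀ a ∈ u, p a = true) (ht : ∀ a ∈ t, p a = false) :
    PySem.List.insertBy
      (fun a b => decide ((!p a) < (!p b)) || !decide ((!p b) < (!p a)) && decide (k2 a < k2 b)) x (u ++ t)
    = PySem.List.insertBy (fun a b => decide (k2 a < k2 b)) x u ++ t := by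
  induction u with
  | nil =>
    simp only [List.nil_append]
    cases t with
    | nil => rfl
    | cons y ys =>
      have hy : p y = false := ht y (by simp)
      simp [PySem.List.insertBy, hx, hy]
  | cons a u ih =>
    have ha : p a = true := hu a (by simp)
    have hrest : ∀ b ∈ u, p b = true := fun b hb => hu b (by simp [hb])
    simp only [List.cons_append, PySem.List.insertBy, hx, ha]
    by_cases hk : k2 x < k2 a
    · simp [hk]
    · simp [hk, ih hrest]

-- Inserting a group-false element skips the all-true prefix u and inserts into t
-- under the plain k2 comparison.
theorem insertBy2_append_right {α κ : Type} [LinearOrder κ] (p : α → Bool) (k2 : α → κ)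
    (x : α) (u t : List α) (hx : p x = false)
    (hu : ∀ a ∈ u, p a = true) (ht : ∀ a ∈ t, p a = false) :
    PySem.List.insertBy
      (fun a b => decide ((!p a) < (!p b)) || !decide ((!p b) < (!p a)) && decide (k2 a < k2 b)) x (u ++ t)
    = u ++ PySem.List.insertBy (fun a b => decide (k2 a < k2 b)) x t := by
  induction u with
  | nil =>
    simp only [List.nil_append]
    induction t with
    | nil => rfl
    | cons y ys iht =>
      have hy : p y = false := ht y (by simp)
      have hrest : ∀ b ∈ ys, p b = false := fun b hb => ht b (by simp [hb])
      simp only [PySem.List.insertBy, hx, hy]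
      by_cases hk : k2 x < k2 y
      · simp [hk]
      · simp [hk, iht hrest]
  | cons a u ih =>
    have ha : p a = true := hu a (by simp)
    have hrest : ∀ b ∈ u, p b = true := fun b hb => hu b (by simp [hb])
    simp [PySem.List.insertBy, hx, ha, ih hrest]

-- The composite-key insertion sort, started from u ++ t (u all-true, t all-false),
-- is the pair of plain insertion sorts on the two filtered halves.
theorem foldl_insertBy2_split {α κ : Type} [LinearOrder κ] (p : α → Bool) (k2 : α → κ)
    (xs : List α) : ∀ (u t : List α), (∀ a ∈ u, p a = true) → (∀ a ∈ t, p a = false) →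
    xs.foldl (fun acc x => PySem.List.insertBy
      (fun a b => decide ((!p a) < (!p b)) || !decide ((!p b) < (!p a)) && decide (k2 a < k2 b)) x acc) (u ++ t)
    = (xs.filter p).foldl (fun acc x => PySem.List.insertBy (fun a b => decide (k2 a < k2 b)) x acc) u
      ++ (xs.filter (fun x => !p x)).foldl (fun acc x => PySem.List.insertBy (fun a b => decide (k2 a < k2 b)) x acc) t := by
  induction xs with
  | nil => intro u t _ _; rfl
  | cons x xs ih =>
    intro u t hu ht
    by_cases hx : p x = true
    · rw [List.foldl_cons, insertBy2_append_left p k2 x u t hx hu ht,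
          ih (PySem.List.insertBy (fun a b => decide (k2 a < k2 b)) x u) t
            (fun a ha => by
              rcases (PySem.List.mem_insertBy _ _ _ _).1 ha with h | h
              · exact h ▸ hx
              · exact hu a h) ht]
      simp [hx]
    · have hx' : p x = false := by simpa using hx
      rw [List.foldl_cons, insertBy2_append_right p k2 x u t hx' hu ht,
          ih u (PySem.List.insertBy (fun a b => decide (k2 a < k2 b)) x t) hu
            (fun a ha => by
              rcases (PySem.List.mem_insertBy _ _ _ _).1 ha with h | h
              · exact h ▸ hx'
              · exact ht a h)]
      simp [hx']

-- A's accumulator loop is the pair of filters.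
theorem foldl_pair_filter {α : Type} (p : α → Bool) (ts : List α) :
    ∀ (acc : List α × List α),
    ts.foldl (fun acc e => if p e then (acc.1 ++ [e], acc.2) else (acc.1, acc.2 ++ [e])) acc
    = (acc.1 ++ ts.filter p, acc.2 ++ ts.filter (fun e => !p e)) := by
  induction ts with
  | nil => intro acc; simp
  | cons x ts ih =>
    intro acc
    by_cases hx : p x = true
    · simp [hx, ih]
    · have hx' : p x = false := by simpa using hx
      simp [hx', ih]

-- Per region list: A's partition-sort-concat equals B's composite-key sort.
theorem per_list_eq (ts : List (String × String × String)) :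
    PySem.List.sorted (ts.filter (fun e => PySem.Str.startswith (PySem.Str.strip e.2.2) "--"))
        (fun x => PySem.Str.lower x.1) ++
    PySem.List.sorted (ts.filter (fun e => !PySem.Str.startswith (PySem.Str.strip e.2.2) "--"))
        (fun x => PySem.Str.lower x.1)
    = PySem.List.sorted2 ts
        (fun e => !(PySem.Str.startswith (PySem.Str.strip e.2.2) "--"))
        (fun e => PySem.Str.lower e.1) := by
  have h := foldl_insertBy2_split
    (fun e : String × String × String => PySem.Str.startswith (PySem.Str.strip e.2.2) "--")
    (fun e => PySem.Str.lower e.1) ts [] [] (by simp) (by simp)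
  simp only [List.nil_append] at h
  simpa [PySem.List.sorted, PySem.List.sorted2] using h.symm

-- ===== VERDICT (by name: the statement is the Claim_ definition above) =====
theorem sort_regions_by_keys_spec : Claim_equal_sort_regions_by_keys := by
  intro regions _
  unfold Spec_sort_regions_by_keys sort_regions_by_keys sort_regions_by_keys_alt
  refine List.map_congr_left (fun r _ => ?_)
  simp only [foldl_pair_filter, List.nil_append]
  exact congrArg (Prod.mk r.1) (per_list_eq r.2)
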